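-- pv_equiv track=rewrite | github.com/anonymous14386/AI-Beat-Maker | sample_library_organizer.py | get_category_from_path
-- ===== SOURCE A (Python) =====
-- def get_category_from_path(path):
--     """Determines the sample category using keyword lists."""
--     path_lower = path.lower()
--
--     # Define keywords for each category
--     DRUMS = ['kick', 'bd', 'snare', 'sd', 'hat', 'hh', 'clap', '808', 'tom', 'cymbal', 'cym', 'ride', 'crash']
--     PERCUSSION = ['perc', 'shaker', 'tamb', 'conga', 'bongo', 'clave', 'rim', 'block', 'timbale']
--     FX = ['fx', 'sfx', 'riser', 'fall', 'downer', 'whoosh', 'impact', 'hit', 'transition', 'sweep', 'braam', 'zap']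
--     MELODIC = ['bass', 'synth', 'pad', 'lead', 'pluck', 'keys', 'piano', 'guitar', 'strings', 'vox', 'vocal', 'chord', 'arp']
--     AMBIENCE = ['ambience', 'amb', 'drone', 'texture']
--
--     if 'midi' in path_lower: return 'MIDI'
--     if 'stem' in path_lower or '!stems' in path_lower: return 'Stems'
--     if any(k in path_lower for k in FX): return 'Sound Effects (FX)'
--     if any(k in path_lower for k in AMBIENCE): return 'Ambience'
--
--     is_loop = 'loop' in path_lower or 'bpm' in path_lower
--
--     if any(k in path_lower for k in DRUMS):
--         return 'Drum Loops' if is_loop else 'Drums'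
--
--     if any(k in path_lower for k in PERCUSSION):
--         return 'Percussion Loops' if is_loop else 'Percussion'
--
--     if any(k in path_lower for k in MELODIC):
--         return 'Melodic Loops' if is_loop else 'Melodic One-Shots'
--
--     if is_loop: return 'Loops' # Generic loop category
--
--     return 'Uncategorized'
-- ===== SOURCE B (Python) =====
-- # B: single left-to-right scan over the string with a min-rank accumulator.
-- # Instead of testing each category's keyword list against the whole path in
-- # priority order, walk the path positions once, matching every keyword of a
-- # flat (keyword, priority-rank) table at each position, and keep the minimum
-- # rank seen (plus a loop flag); the label is then picked from a rank-indexed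
-- # label table.
-- _KEYMAP = [
--     ('midi', 0),
--     ('stem', 1), ('!stems', 1),
--     ('fx', 2), ('sfx', 2), ('riser', 2), ('fall', 2), ('downer', 2),
--     ('whoosh', 2), ('impact', 2), ('hit', 2), ('transition', 2),
--     ('sweep', 2), ('braam', 2), ('zap', 2),
--     ('ambience', 3), ('amb', 3), ('drone', 3), ('texture', 3),
--     ('kick', 4), ('bd', 4), ('snare', 4), ('sd', 4), ('hat', 4), ('hh', 4),
--     ('clap', 4), ('808', 4), ('tom', 4), ('cymbal', 4), ('cym', 4),
--     ('ride', 4), ('crash', 4),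
--     ('perc', 5), ('shaker', 5), ('tamb', 5), ('conga', 5), ('bongo', 5),
--     ('clave', 5), ('rim', 5), ('block', 5), ('timbale', 5),
--     ('bass', 6), ('synth', 6), ('pad', 6), ('lead', 6), ('pluck', 6),
--     ('keys', 6), ('piano', 6), ('guitar', 6), ('strings', 6), ('vox', 6),
--     ('vocal', 6), ('chord', 6), ('arp', 6),
-- ]
-- _LABELS = [
--     ('MIDI', 'MIDI'),
--     ('Stems', 'Stems'),
--     ('Sound Effects (FX)', 'Sound Effects (FX)'),
--     ('Ambience', 'Ambience'),
--     ('Drums', 'Drum Loops'),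
--     ('Percussion', 'Percussion Loops'),
--     ('Melodic One-Shots', 'Melodic Loops'),
-- ]
--
--
-- def get_category_from_path(path):
--     """Classify by one positional scan keeping the minimum matched rank."""
--     p = path.lower()
--     best = 7
--     is_loop = False
--     for i in range(len(p)):
--         for kw, r in _KEYMAP:
--             if p.startswith(kw, i):
--                 best = min(best, r)
--         if p.startswith('loop', i) or p.startswith('bpm', i):
--             is_loop = True
--     if best < 7:
--         one_shot, loop_label = _LABELS[best]
--         return loop_label if is_loop else one_shot
--     return 'Loops' if is_loop else 'Uncategorized'
-- ===== Notes on version B (the rewrite author's own statement) =====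
-- stated objective: alternative
-- what changed: Replaced A's priority chain of whole-string keyword membership tests by a single left-to-right positional scan of the path that matches a flat (keyword, priority-rank) table at every position and keeps the minimum matched rank plus a loop flag; the label is then picked from a rank-indexed label table.
import Mathlib
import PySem

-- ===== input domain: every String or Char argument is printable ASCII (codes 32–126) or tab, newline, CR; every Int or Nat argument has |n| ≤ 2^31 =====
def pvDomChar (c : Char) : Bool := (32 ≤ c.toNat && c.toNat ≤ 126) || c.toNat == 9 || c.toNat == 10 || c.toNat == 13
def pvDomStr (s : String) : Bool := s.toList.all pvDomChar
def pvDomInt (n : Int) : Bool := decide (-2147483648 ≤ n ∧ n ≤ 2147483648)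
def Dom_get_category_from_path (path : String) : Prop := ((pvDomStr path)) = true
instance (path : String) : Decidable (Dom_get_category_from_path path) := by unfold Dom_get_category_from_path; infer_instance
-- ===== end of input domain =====

-- B replaces A's priority chain of whole-string membership tests by ONE positional
-- scan of the path that keeps the minimum matched priority rank (objective: alternative; same asymptotic cost, larger constant).

-- ===== PORT A =====
def get_category_from_path (path : String) : String :=
  let path_lower := PySem.Str.lower path
  let DRUMS := ["kick", "bd", "snare", "sd", "hat", "hh", "clap", "808", "tom", "cymbal", "cym", "ride", "crash"]
  let PERCUSSION := ["perc", "shaker", "tamb", "conga", "bongo", "clave", "rim", "block", "timbale"]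
  let FX := ["fx", "sfx", "riser", "fall", "downer", "whoosh", "impact", "hit", "transition", "sweep", "braam", "zap"]
  let MELODIC := ["bass", "synth", "pad", "lead", "pluck", "keys", "piano", "guitar", "strings", "vox", "vocal", "chord", "arp"]
  let AMBIENCE := ["ambience", "amb", "drone", "texture"]
  if PySem.Str.isIn "midi" path_lower then "MIDI"
  else if PySem.Str.isIn "stem" path_lower || PySem.Str.isIn "!stems" path_lower then "Stems"
  else if FX.any (fun k => PySem.Str.isIn k path_lower) then "Sound Effects (FX)"
  else if AMBIENCE.any (fun k => PySem.Str.isIn k path_lower) then "Ambience"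
  else
    let is_loop := PySem.Str.isIn "loop" path_lower || PySem.Str.isIn "bpm" path_lower
    if DRUMS.any (fun k => PySem.Str.isIn k path_lower) then
      if is_loop then "Drum Loops" else "Drums"
    else if PERCUSSION.any (fun k => PySem.Str.isIn k path_lower) then
      if is_loop then "Percussion Loops" else "Percussion"
    else if MELODIC.any (fun k => PySem.Str.isIn k path_lower) then
      if is_loop then "Melodic Loops" else "Melodic One-Shots"
    else if is_loop then "Loops"
    else "Uncategorized"

-- ===== PORT B =====
-- Source B's flat (keyword, priority-rank) table _KEYMAP and rank-indexed label table _LABELS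
def pvKeymap : List (String × Nat) :=
  [ ("midi", 0),
    ("stem", 1), ("!stems", 1),
    ("fx", 2), ("sfx", 2), ("riser", 2), ("fall", 2), ("downer", 2),
    ("whoosh", 2), ("impact", 2), ("hit", 2), ("transition", 2),
    ("sweep", 2), ("braam", 2), ("zap", 2),
    ("ambience", 3), ("amb", 3), ("drone", 3), ("texture", 3),
    ("kick", 4), ("bd", 4), ("snare", 4), ("sd", 4), ("hat", 4), ("hh", 4),
    ("clap", 4), ("808", 4), ("tom", 4), ("cymbal", 4), ("cym", 4),
    ("ride", 4), ("crash", 4),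
    ("perc", 5), ("shaker", 5), ("tamb", 5), ("conga", 5), ("bongo", 5),
    ("clave", 5), ("rim", 5), ("block", 5), ("timbale", 5),
    ("bass", 6), ("synth", 6), ("pad", 6), ("lead", 6), ("pluck", 6),
    ("keys", 6), ("piano", 6), ("guitar", 6), ("strings", 6), ("vox", 6),
    ("vocal", 6), ("chord", 6), ("arp", 6) ]

def pvLabels : List (String × String) :=
  [ ("MIDI", "MIDI"),
    ("Stems", "Stems"),
    ("Sound Effects (FX)", "Sound Effects (FX)"),
    ("Ambience", "Ambience"),
    ("Drums", "Drum Loops"),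
    ("Percussion", "Percussion Loops"),
    ("Melodic One-Shots", "Melodic Loops") ]

-- the body of Source B's loop at one position i; p.startswith(kw, i) with 0 ≤ i ≤ len(p)
-- is exactly 'startswith (p.drop i) kw' (exact port of the start-argument form)
def pvStep (suf : List Char) (st : Nat × Bool) : Nat × Bool :=
  ( pvKeymap.foldl (fun b kr => if PySem.Chars.startswith suf kr.1.toList then min b kr.2 else b) st.1,
    st.2 || PySem.Chars.startswith suf "loop".toList || PySem.Chars.startswith suf "bpm".toList )

def get_category_from_path_alt (path : String) : String :=
  let p := (PySem.Str.lower path).toList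
  let st := (List.range p.length).foldl (fun st i => pvStep (p.drop i) st) (7, false)
  if st.1 < 7 then
    -- _LABELS[best]: in range since the guard gives best < 7 = len(_LABELS)
    let lbl := pvLabels.getD st.1 ("", "")
    if st.2 then lbl.2 else lbl.1
  else if st.2 then "Loops" else "Uncategorized"

-- ===== PRECONDITION & SPEC =====
def Spec_get_category_from_path (path : String) (out : String) : Prop := out = get_category_from_path_alt path
instance (path : String) (out : String) : Decidable (Spec_get_category_from_path path out) := by unfold Spec_get_category_from_path; infer_instance

-- ===== CLAIM (what is proved, stated in full; the proofs are below) =====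
def Claim_equal_get_category_from_path : Prop := ∀ (path : String), Dom_get_category_from_path path → Spec_get_category_from_path path (get_category_from_path path)

-- ===== LEMMAS AND PROOFS =====

-- B's position fold, as a function of the suffix list
def pvPosFold (l : List Char) (s : Nat × Bool) : Nat × Bool :=
  (List.range l.length).foldl (fun st i => pvStep (l.drop i) st) s

-- reference value: fold of whole-string membership over the keymap
def pvKmFold (l : List Char) : Nat :=
  pvKeymap.foldl (fun b kr => if PySem.Chars.isIn kr.1.toList l then min b kr.2 else b) 7

lemma pvPosFold_nil (s : Nat × Bool) : pvPosFold [] s = s := rfl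

lemma pvPosFold_cons (c : Char) (t : List Char) (s : Nat × Bool) :
    pvPosFold (c :: t) s = pvPosFold t (pvStep (c :: t) s) := by
  unfold pvPosFold
  simp [List.range_succ_eq_map, List.foldl_map, List.foldl_cons]

lemma foldl_minif_le {α : Type} (km : List α) (P : α → Bool) (r : α → Nat) (a : Nat) :
    km.foldl (fun b e => if P e then min b (r e) else b) a ≤ a := by
  induction km generalizing a with
  | nil => simp
  | cons e rest ih =>
    simp only [List.foldl_cons]
    by_cases h : P e
    · simp only [h, if_pos]
      exact le_trans (ih (min a (r e))) (Nat.min_le_left _ _)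
    · simp only [h, if_neg, Bool.false_eq_true, not_false_iff]
      exact ih a

lemma foldl_minif_acc {α : Type} (km : List α) (P : α → Bool) (r : α → Nat) (a : Nat)
    (ha : a ≤ 7) :
    km.foldl (fun b e => if P e then min b (r e) else b) a
      = min a (km.foldl (fun b e => if P e then min b (r e) else b) 7) := by
  induction km generalizing a with
  | nil => simp; omega
  | cons e rest ih =>
    simp only [List.foldl_cons]
    by_cases h : P e
    · simp only [h, if_pos]
      rw [ih (min a (r e)) (by omega), ih (min 7 (r e)) (by omega)]
      omega
    · simp only [h, if_neg, Bool.false_eq_true, not_false_iff]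
      exact ih a ha

lemma foldl_minif_or {α : Type} (km : List α) (P Q : α → Bool) (r : α → Nat) (a b : Nat) :
    km.foldl (fun x e => if P e || Q e then min x (r e) else x) (min a b)
      = min (km.foldl (fun x e => if P e then min x (r e) else x) a)
            (km.foldl (fun x e => if Q e then min x (r e) else x) b) := by
  induction km generalizing a b with
  | nil => simp
  | cons e rest ih =>
    simp only [List.foldl_cons]
    by_cases hP : P e <;> by_cases hQ : Q e <;>
      simp only [hP, hQ, Bool.or_true, Bool.or_false,
        if_pos, if_neg, Bool.false_eq_true, not_false_iff]
    · rw [show min (min a b) (r e) = min (min a (r e)) (min b (r e)) by omega]; exact ih _ _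
    · rw [show min (min a b) (r e) = min (min a (r e)) b by omega]; exact ih _ _
    · rw [show min (min a b) (r e) = min a (min b (r e)) by omega]; exact ih _ _
    · exact ih _ _

lemma isIn_cons (kw : List Char) (c : Char) (t : List Char) :
    PySem.Chars.isIn kw (c :: t)
      = (PySem.Chars.startswith (c :: t) kw || PySem.Chars.isIn kw t) := by
  by_cases h : kw <+: (c :: t) ∨ kw <:+: t
  · have : PySem.Chars.isIn kw (c :: t) = true := by
      rw [PySem.Chars.isIn_iff_infix, List.infix_cons_iff]; exact h
    rw [this]
    rcases h with h | h
    · rw [show PySem.Chars.startswith (c :: t) kw = true from (PySem.Chars.startswith_iff _ _).mpr h]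
      simp
    · rw [show PySem.Chars.isIn kw t = true from (PySem.Chars.isIn_iff_infix _ _).mpr h]
      simp
  · push Not at h
    have h1 : PySem.Chars.isIn kw (c :: t) = false := by
      rw [PySem.Chars.isIn_eq_false_iff, List.infix_cons_iff]; push Not; exact h
    have h2 : PySem.Chars.startswith (c :: t) kw = false := by
      cases hb : PySem.Chars.startswith (c :: t) kw
      · rfl
      · exact absurd ((PySem.Chars.startswith_iff _ _).mp hb) h.1
    have h3 : PySem.Chars.isIn kw t = false := by
      rw [PySem.Chars.isIn_eq_false_iff]; exact h.2
    rw [h1, h2, h3]; rfl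

lemma pvKmFold_cons (c : Char) (t : List Char) :
    pvKmFold (c :: t)
      = min (pvKeymap.foldl (fun b kr => if PySem.Chars.startswith (c :: t) kr.1.toList then min b kr.2 else b) 7)
            (pvKmFold t) := by
  unfold pvKmFold
  simp only [isIn_cons]
  have h := foldl_minif_or pvKeymap
        (fun kr => PySem.Chars.startswith (c :: t) kr.1.toList)
        (fun kr => PySem.Chars.isIn kr.1.toList t) (fun kr => kr.2) 7 7
  simpa using h

lemma pvPosFold_fst (l : List Char) (b : Nat) (lp : Bool) (hb : b ≤ 7) :
    (pvPosFold l (b, lp)).1 = min b (pvKmFold l) := by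
  induction l generalizing b lp with
  | nil =>
    rw [pvPosFold_nil]
    have : pvKmFold [] = 7 := by decide
    rw [this]; omega
  | cons c t ih =>
    rw [pvPosFold_cons]
    have hstep : (pvStep (c :: t) (b, lp)).1
        = min b (pvKeymap.foldl (fun x kr => if PySem.Chars.startswith (c :: t) kr.1.toList then min x kr.2 else x) 7) := by
      simp only [pvStep]
      exact foldl_minif_acc pvKeymap (fun kr => PySem.Chars.startswith (c :: t) kr.1.toList) (fun kr => kr.2) b hb
    have hle : (pvStep (c :: t) (b, lp)).1 ≤ 7 := by
      simp only [pvStep]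
      exact le_trans (foldl_minif_le pvKeymap (fun kr => PySem.Chars.startswith (c :: t) kr.1.toList) (fun kr => kr.2) b) hb
    have := ih (pvStep (c :: t) (b, lp)).1 (pvStep (c :: t) (b, lp)).2 hle
    rw [show ((pvStep (c :: t) (b, lp)).1, (pvStep (c :: t) (b, lp)).2) = pvStep (c :: t) (b, lp) from rfl] at this
    rw [this, hstep, pvKmFold_cons]
    omega

lemma pvPosFold_snd (l : List Char) (b : Nat) (lp : Bool) :
    (pvPosFold l (b, lp)).2
      = (lp || PySem.Chars.isIn "loop".toList l || PySem.Chars.isIn "bpm".toList l) := by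
  induction l generalizing b lp with
  | nil =>
    rw [pvPosFold_nil]
    have h1 : PySem.Chars.isIn "loop".toList ([] : List Char) = false := by decide
    have h2 : PySem.Chars.isIn "bpm".toList ([] : List Char) = false := by decide
    rw [h1, h2]; simp
  | cons c t ih =>
    rw [pvPosFold_cons]
    have := ih (pvStep (c :: t) (b, lp)).1 (pvStep (c :: t) (b, lp)).2
    rw [show ((pvStep (c :: t) (b, lp)).1, (pvStep (c :: t) (b, lp)).2) = pvStep (c :: t) (b, lp) from rfl] at this
    rw [this]
    simp only [pvStep]
    rw [isIn_cons "loop".toList c t, isIn_cons "bpm".toList c t]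
    cases lp <;> cases PySem.Chars.startswith (c :: t) "loop".toList <;>
      cases PySem.Chars.startswith (c :: t) "bpm".toList <;>
      cases PySem.Chars.isIn "loop".toList t <;> cases PySem.Chars.isIn "bpm".toList t <;> rfl

-- fold of one constant-rank keyword group
lemma foldl_minif_const (ks : List String) (k a : Nat) (l : List Char) :
    (ks.map (fun s => (s, k))).foldl
        (fun b kr => if PySem.Chars.isIn kr.1.toList l then min b kr.2 else b) a
      = if ks.any (fun s => PySem.Chars.isIn s.toList l) then min a k else a := by
  induction ks generalizing a with
  | nil => simp
  | cons e rest ih =>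
    simp only [List.map_cons, List.foldl_cons, List.any_cons]
    by_cases h : PySem.Chars.isIn e.toList l
    · simp only [h, Bool.true_or, if_pos]
      rw [ih (min a k)]
      split_ifs <;> omega
    · simp only [h, Bool.false_eq_true, Bool.false_or, if_neg, not_false_iff]
      exact ih a

set_option maxHeartbeats 2000000 in
lemma pvKmFold_chain (l : List Char) :
    pvKmFold l =
      if PySem.Chars.isIn "midi".toList l then 0
      else if PySem.Chars.isIn "stem".toList l || PySem.Chars.isIn "!stems".toList l then 1
      else if (["fx", "sfx", "riser", "fall", "downer", "whoosh", "impact", "hit", "transition", "sweep", "braam", "zap"]).any (fun k => PySem.Chars.isIn k.toList l) then 2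
      else if (["ambience", "amb", "drone", "texture"]).any (fun k => PySem.Chars.isIn k.toList l) then 3
      else if (["kick", "bd", "snare", "sd", "hat", "hh", "clap", "808", "tom", "cymbal", "cym", "ride", "crash"]).any (fun k => PySem.Chars.isIn k.toList l) then 4
      else if (["perc", "shaker", "tamb", "conga", "bongo", "clave", "rim", "block", "timbale"]).any (fun k => PySem.Chars.isIn k.toList l) then 5
      else if (["bass", "synth", "pad", "lead", "pluck", "keys", "piano", "guitar", "strings", "vox", "vocal", "chord", "arp"]).any (fun k => PySem.Chars.isIn k.toList l) then 6
      else 7 := by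
  have e : pvKeymap =
      (["midi"].map (fun s => (s, 0)))
      ++ (["stem", "!stems"].map (fun s => (s, 1)))
      ++ (["fx", "sfx", "riser", "fall", "downer", "whoosh", "impact", "hit", "transition", "sweep", "braam", "zap"].map (fun s => (s, 2)))
      ++ (["ambience", "amb", "drone", "texture"].map (fun s => (s, 3)))
      ++ (["kick", "bd", "snare", "sd", "hat", "hh", "clap", "808", "tom", "cymbal", "cym", "ride", "crash"].map (fun s => (s, 4)))
      ++ (["perc", "shaker", "tamb", "conga", "bongo", "clave", "rim", "block", "timbale"].map (fun s => (s, 5)))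
      ++ (["bass", "synth", "pad", "lead", "pluck", "keys", "piano", "guitar", "strings", "vox", "vocal", "chord", "arp"].map (fun s => (s, 6))) := rfl
  unfold pvKmFold
  rw [e]
  simp only [List.foldl_append, foldl_minif_const, List.any_cons, List.any_nil, Bool.or_false]
  split_ifs <;> omega

lemma pvChainCase (g0 g1a g1b g2 g3 g4 g5 g6 lo : Bool) :
    (if g0 then "MIDI"
     else if g1a || g1b then "Stems"
     else if g2 then "Sound Effects (FX)"
     else if g3 then "Ambience"
     else if g4 then if lo then "Drum Loops" else "Drums"
     else if g5 then if lo then "Percussion Loops" else "Percussion"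
     else if g6 then if lo then "Melodic Loops" else "Melodic One-Shots"
     else if lo then "Loops" else "Uncategorized")
    = (if (if g0 then 0 else if g1a || g1b then 1 else if g2 then 2 else if g3 then 3
           else if g4 then 4 else if g5 then 5 else if g6 then 6 else 7) < 7 then
         (if lo then
            (pvLabels.getD (if g0 then 0 else if g1a || g1b then 1 else if g2 then 2 else if g3 then 3
               else if g4 then 4 else if g5 then 5 else if g6 then 6 else 7) ("", "")).2
          else
            (pvLabels.getD (if g0 then 0 else if g1a || g1b then 1 else if g2 then 2 else if g3 then 3
               else if g4 then 4 else if g5 then 5 else if g6 then 6 else 7) ("", "")).1)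
       else if lo then "Loops" else "Uncategorized") := by
  cases g0 <;> cases g1a <;> cases g1b <;> cases g2 <;> cases g3 <;> cases g4 <;> cases g5 <;> cases g6 <;> cases lo <;> rfl

lemma pvKmFold_le (l : List Char) : pvKmFold l ≤ 7 :=
  foldl_minif_le pvKeymap (fun kr => PySem.Chars.isIn kr.1.toList l) (fun kr => kr.2) 7

-- ===== VERDICT (by name: the statement is the Claim_ definition above) =====
set_option maxHeartbeats 1000000 in
theorem get_category_from_path_spec : Claim_equal_get_category_from_path := by
  intro path _
  unfold Spec_get_category_from_path get_category_from_path get_category_from_path_alt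
  simp only [PySem.Str.isIn_eq]
  rw [show (List.range (PySem.Str.lower path).toList.length).foldl
        (fun st i => pvStep ((PySem.Str.lower path).toList.drop i) st) ((7 : Nat), (false : Bool))
      = pvPosFold (PySem.Str.lower path).toList ((7 : Nat), (false : Bool)) from rfl]
  rw [pvPosFold_fst _ 7 false (by omega), pvPosFold_snd _ 7 false]
  rw [Nat.min_eq_right (pvKmFold_le _), pvKmFold_chain]
  simp only [Bool.false_or]
  exact pvChainCase _ _ _ _ _ _ _ _ _
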